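-- pv_equiv track=rewrite | github.com/awais-124/ICPC | ICPC-2024-Solutions/PY.py | find_anagram_prefixes
-- ===== SOURCE A (Python) =====
-- def find_anagram_prefixes(calligraphies, queries):
--     """Find calligraphies with anagram prefix for each query"""
--     results = []
--
--     for query in queries:
--         count = 0
--         query_sorted = sorted(query)
--         query_len = len(query)
--
--         for calli in calligraphies:
--             # Check all prefixes of calligraphy
--             for end in range(query_len, len(calli) + 1):
--                 prefix = calli[:end]
--                 if len(prefix) >= query_len:
--                     if sorted(prefix[:query_len]) == query_sorted:
--                         count += 1
--                         break  # Found in this calligraphy, move to next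
--
--         results.append(count if count > 0 else -1)
--
--     return results
-- ===== SOURCE B (Python) =====
-- def find_anagram_prefixes(calligraphies, queries):
--     """Find calligraphies with anagram prefix for each query"""
--     # Precompute, for each distinct query length L, a counter keyed by the
--     # sorted L-prefix of every calligraphy of length >= L; answer each query
--     # by a single lookup of its sorted characters.
--     index = {}
--     for query in queries:
--         L = len(query)
--         if L not in index:
--             counts = {}
--             for calli in calligraphies:
--                 if len(calli) >= L:
--                     key = ''.join(sorted(calli[:L]))
--                     counts[key] = counts.get(key, 0) + 1
--             index[L] = counts
--     results = []
--     for query in queries: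
--         n = index[len(query)].get(''.join(sorted(query)), 0)
--         results.append(n if n > 0 else -1)
--     return results
-- ===== Notes on version B (the rewrite author's own statement) =====
-- stated objective: faster
-- what changed: Replaces A's per-query rescan of all calligraphies (whose inner loop sorts every prefix of every calligraphy) with a precomputed per-distinct-length counter keyed by the sorted L-prefix, so each query is answered by one dictionary lookup.
import Mathlib
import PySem

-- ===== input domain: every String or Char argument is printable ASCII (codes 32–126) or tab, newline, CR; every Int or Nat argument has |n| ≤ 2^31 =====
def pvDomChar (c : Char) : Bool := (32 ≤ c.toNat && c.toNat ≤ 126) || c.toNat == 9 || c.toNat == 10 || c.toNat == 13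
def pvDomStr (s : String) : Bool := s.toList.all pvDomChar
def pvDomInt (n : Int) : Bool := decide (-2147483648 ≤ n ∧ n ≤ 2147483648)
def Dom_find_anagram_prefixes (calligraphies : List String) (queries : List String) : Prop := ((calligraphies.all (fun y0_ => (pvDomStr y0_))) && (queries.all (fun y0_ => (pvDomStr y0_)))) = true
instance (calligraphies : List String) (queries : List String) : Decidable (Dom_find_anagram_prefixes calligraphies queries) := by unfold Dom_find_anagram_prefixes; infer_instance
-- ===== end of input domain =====

-- B precomputes one counter of sorted L-prefixes per distinct query length and answers each
-- query by a dictionary lookup, instead of A's per-query rescan that sorts every prefix.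

-- ===== PORT A =====
-- sorted(xs) on characters
def pvSort (cs : List Char) : List Char := PySem.List.sorted cs (fun x => x) false

-- A's inner 'for end in range(...)' loop with its break, returning whether the break fired
def pvScanEnds (ends : List Int) (calli : List Char) (query_sorted : List Char) (query_len : Int) : Bool :=
  match ends with
  | [] => false
  | e :: rest =>
    let pref := PySem.List.slice calli none (some e)
    if query_len ≤ (pref.length : Int) then
      if pvSort (PySem.List.slice pref none (some query_len)) = query_sorted then true
      else pvScanEnds rest calli query_sorted query_len
    else pvScanEnds rest calli query_sorted query_len

def find_anagram_prefixes (calligraphies : List String) (queries : List String) : List Int :=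
  queries.foldl (fun results query =>
    let query_sorted := pvSort query.toList
    let query_len : Int := (query.toList.length : Int)
    let count : Int := calligraphies.foldl (fun count calli =>
      if pvScanEnds (PySem.List.pyRange query_len ((calli.toList.length : Int) + 1) 1)
           calli.toList query_sorted query_len
      then count + 1 else count) 0
    results ++ [if count > 0 then count else -1]) []

-- ===== PORT B =====
-- ''.join(sorted(calli[:L]))
def pvKey (L : Int) (calli : String) : String :=
  String.ofList (pvSort (PySem.List.slice calli.toList none (some L)))

-- the counter built for one length L: {sorted(calli[:L]): multiplicity} over calligraphies of length >= L
def pvCounts (calligraphies : List String) (L : Int) : PySem.Dict String Int :=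
  calligraphies.foldl (fun counts calli =>
    if L ≤ (calli.toList.length : Int) then
      counts.insert (pvKey L calli) (counts.getD (pvKey L calli) 0 + 1)
    else counts) PySem.Dict.empty

-- one iteration of B's index-building loop: 'if L not in index: index[L] = counts'
def pvStep (cs : List String) (d : PySem.Dict Int (PySem.Dict String Int)) (query : String) :
    PySem.Dict Int (PySem.Dict String Int) :=
  if d.contains ((query.toList.length : Int)) then d
  else d.insert ((query.toList.length : Int)) (pvCounts cs ((query.toList.length : Int)))

def find_anagram_prefixes_alt (calligraphies : List String) (queries : List String) : List Int :=
  let index := queries.foldl (pvStep calligraphies) PySem.Dict.empty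
  queries.foldl (fun results query =>
    let n := (index.getD ((query.toList.length : Int)) PySem.Dict.empty).getD
               (String.ofList (pvSort query.toList)) 0
    results ++ [if n > 0 then n else -1]) []

-- ===== PRECONDITION & SPEC =====
def Spec_find_anagram_prefixes (calligraphies : List String) (queries : List String) (out : List Int) : Prop := out = find_anagram_prefixes_alt calligraphies queries
instance (calligraphies : List String) (queries : List String) (out : List Int) : Decidable (Spec_find_anagram_prefixes calligraphies queries out) := by unfold Spec_find_anagram_prefixes; infer_instance

-- ===== CLAIM (what is proved, stated in full; the proofs are below) =====
def Claim_equal_find_anagram_prefixes : Prop := ∀ (calligraphies : List String) (queries : List String), Dom_find_anagram_prefixes calligraphies queries → Spec_find_anagram_prefixes calligraphies queries (find_anagram_prefixes calligraphies queries)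

-- ===== LEMMAS AND PROOFS =====

-- A's inner loop never breaks after a first failure: the tested condition does not depend on `end`
lemma pvScanEnds_false (c qs : List Char) (L : Nat) (ends : List Int)
    (hmem : ∀ e ∈ ends, (L : Int) ≤ e ∧ e ≤ (c.length : Int))
    (hne : pvSort (c.take L) ≠ qs) :
    pvScanEnds ends c qs (L : Int) = false := by
  induction ends with
  | nil => rfl
  | cons e rest ih =>
    obtain ⟨hle, hub⟩ := hmem e (by simp)
    have h0 : (0 : Int) ≤ e := le_trans (by positivity) hle
    have he : e = ((e.toNat : Nat) : Int) := (Int.toNat_of_nonneg h0).symm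
    have hLe : L ≤ e.toNat := by omega
    have hsl : PySem.List.slice c none (some e) = c.take e.toNat := by
      rw [he, PySem.List.slice_to_natCast, Int.toNat_natCast]
    simp only [pvScanEnds, hsl, PySem.List.slice_to_natCast, List.length_take]
    rw [if_pos (by push_cast; omega)]
    rw [List.take_take, min_eq_left hLe, if_neg hne]
    exact ih (fun x hx => hmem x (by simp [hx]))

-- characterisation of A's inner loop over the full range
lemma pvScanEnds_range (c qs : List Char) (L : Nat) :
    pvScanEnds (PySem.List.pyRange (L : Int) ((c.length : Int) + 1) 1) c qs (L : Int)
      = decide (L ≤ c.length ∧ pvSort (c.take L) = qs) := by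
  by_cases hL : L ≤ c.length
  · rw [PySem.List.pyRange_one_cons (by exact_mod_cast Nat.lt_succ_of_le hL)]
    have hsl : PySem.List.slice c none (some ((L : Nat) : Int)) = c.take L :=
      PySem.List.slice_to_natCast c L
    simp only [pvScanEnds, hsl, PySem.List.slice_to_natCast, List.length_take, List.take_take,
      min_self]
    rw [if_pos (by push_cast; omega)]
    by_cases hs : pvSort (c.take L) = qs
    · simp [hs, hL]
    · rw [if_neg hs, pvScanEnds_false c qs L _ ?_ hs]
      · simp [hs]
      · intro e he
        rw [PySem.List.mem_pyRange_one] at he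
        omega
  · rw [PySem.List.pyRange_one_eq_nil (by exact_mod_cast Nat.succ_le_of_lt (Nat.lt_of_not_le hL))]
    simp [pvScanEnds, hL]

-- B's counter lookup counts exactly the matching calligraphies
lemma pvCounts_getD (cs : List String) (L : Nat) (v : List Char) :
    (pvCounts cs (L : Int)).getD (String.ofList v) 0
      = (cs.countP (fun c => decide (L ≤ c.toList.length ∧ pvSort (c.toList.take L) = v)) : Int) := by
  unfold pvCounts
  rw [PySem.List.foldl_ite_eq_foldl_filter]
  have h2 : List.foldl
      (fun (counts : PySem.Dict String Int) calli =>
        counts.insert (pvKey ((L:Nat):Int) calli) (counts.getD (pvKey ((L:Nat):Int) calli) 0 + 1))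
      PySem.Dict.empty (cs.filter (fun x => decide (((L:Nat):Int) ≤ (x.toList.length : Int))))
      = List.foldl (fun (d : PySem.Dict String Int) x => d.insert x (d.getD x 0 + 1))
        PySem.Dict.empty ((cs.filter (fun x => decide (((L:Nat):Int) ≤ (x.toList.length : Int)))).map (pvKey ((L:Nat):Int))) := by
    rw [List.foldl_map]
  rw [h2, PySem.Dict.getD_foldl_insert_add_one, PySem.Dict.getD_empty, zero_add]
  norm_cast
  rw [List.count_eq_countP, List.countP_map, List.countP_filter]
  apply List.countP_congr
  intro c _
  simp only [Function.comp_apply, pvKey, PySem.List.slice_to_natCast]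
  rw [Bool.eq_iff_iff]
  simp only [Bool.and_eq_true, beq_iff_eq, decide_eq_true_eq, String.ofList_inj]
  tauto

-- invariant of B's index: every stored length maps to its counter
def pvInv (cs : List String) (d : PySem.Dict Int (PySem.Dict String Int)) : Prop :=
  ∀ L, d.contains L = true → d.getD L PySem.Dict.empty = pvCounts cs L

lemma pvStep_inv (cs : List String) (d : PySem.Dict Int (PySem.Dict String Int)) (q : String)
    (h : pvInv cs d) : pvInv cs (pvStep cs d q) := by
  unfold pvStep
  split_ifs with hc
  · exact h
  · intro L hL
    rw [PySem.Dict.contains_insert] at hL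
    rw [PySem.Dict.getD_insert]
    split_ifs with he
    · rw [he]
    · apply h
      have hfalse : (L == ((q.toList.length : Nat) : Int)) = false := by simpa using he
      rwa [hfalse, Bool.false_or] at hL

lemma pvFoldl_inv (cs : List String) (qs : List String) (d : PySem.Dict Int (PySem.Dict String Int))
    (h : pvInv cs d) : pvInv cs (qs.foldl (pvStep cs) d) := by
  induction qs generalizing d with
  | nil => exact h
  | cons q rest ih => exact ih _ (pvStep_inv cs d q h)

lemma pvStep_contains_mono (cs : List String) (d : PySem.Dict Int (PySem.Dict String Int))
    (q : String) (L : Int) (h : d.contains L = true) : (pvStep cs d q).contains L = true := by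
  unfold pvStep
  split_ifs with hc
  · exact h
  · rw [PySem.Dict.contains_insert, h, Bool.or_true]

lemma pvFoldl_contains_mono (cs : List String) (qs : List String)
    (d : PySem.Dict Int (PySem.Dict String Int)) (L : Int) (h : d.contains L = true) :
    (qs.foldl (pvStep cs) d).contains L = true := by
  induction qs generalizing d with
  | nil => exact h
  | cons q rest ih => exact ih _ (pvStep_contains_mono cs d q L h)

lemma pvFoldl_contains (cs : List String) (qs : List String)
    (d : PySem.Dict Int (PySem.Dict String Int)) (q : String) (hq : q ∈ qs) :
    (qs.foldl (pvStep cs) d).contains ((q.toList.length : Int)) = true := by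
  induction qs generalizing d with
  | nil => cases hq
  | cons q' rest ih =>
    rcases List.mem_cons.mp hq with h | h
    · subst h
      rw [List.foldl_cons]
      apply pvFoldl_contains_mono
      unfold pvStep
      split_ifs with hc
      · exact hc
      · exact PySem.Dict.contains_insert_self _ _ _
    · exact ih _ h

-- B's finished index answers every query length with its counter
lemma pvIndex_getD (cs : List String) (qs : List String) (q : String) (hq : q ∈ qs) :
    (qs.foldl (pvStep cs) PySem.Dict.empty).getD ((q.toList.length : Int)) PySem.Dict.empty
      = pvCounts cs ((q.toList.length : Int)) := by
  have hinv : pvInv cs (qs.foldl (pvStep cs) PySem.Dict.empty) :=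
    pvFoldl_inv cs qs _ (by intro L hL; simp at hL)
  exact hinv _ (pvFoldl_contains cs qs _ q hq)

-- ===== VERDICT (by name: the statement is the Claim_ definition above) =====
theorem find_anagram_prefixes_spec : Claim_equal_find_anagram_prefixes := by
  intro cs qs _
  unfold Spec_find_anagram_prefixes find_anagram_prefixes find_anagram_prefixes_alt
  simp only []
  rw [PySem.List.foldl_append_singleton_eq_map, PySem.List.foldl_append_singleton_eq_map,
    List.nil_append, List.nil_append]
  apply List.map_congr_left
  intro q hq
  rw [pvIndex_getD cs qs q hq, pvCounts_getD cs (q.toList.length) (pvSort q.toList),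
    PySem.List.foldl_if_add_one, zero_add]
  have hP : ∀ c : String,
      pvScanEnds (PySem.List.pyRange ((q.toList.length : Int)) ((c.toList.length : Int) + 1) 1)
          c.toList (pvSort q.toList) ((q.toList.length : Int))
        = decide (q.toList.length ≤ c.toList.length ∧
            pvSort (List.take q.toList.length c.toList) = pvSort q.toList) :=
    fun c => pvScanEnds_range c.toList (pvSort q.toList) q.toList.length
  simp only [hP]
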